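-- pv_equiv track=rewrite | github.com/hari-114/Chalo_Python | python_mowa/proj/ex.py | sum_dig
-- ===== SOURCE A (Python) =====
-- def sum_dig(num):
--     sum=0
--     pow=0
--     while num>0:
--         digit=num%10
--         sum+=digit**pow
--         pow=num%10
--         num//=10
--     return sum
-- ===== SOURCE B (Python) =====
-- def sum_dig(num):
--     digits = []
--     while num > 0:
--         digits.append(num % 10)
--         num //= 10
--     powers = [0] + digits[:-1]
--     return sum(d ** p for d, p in zip(digits, powers))
-- ===== Notes on version B (the rewrite author's own statement) =====
-- stated objective: alternative
-- what changed: Replaced the single interleaved loop that threads a rolling 'pow' variable with two phases: extract the digit list least-significant-first, then sum each digit raised to its predecessor digit via zip(digits, [0]+digits[:-1]).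
import Mathlib
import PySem

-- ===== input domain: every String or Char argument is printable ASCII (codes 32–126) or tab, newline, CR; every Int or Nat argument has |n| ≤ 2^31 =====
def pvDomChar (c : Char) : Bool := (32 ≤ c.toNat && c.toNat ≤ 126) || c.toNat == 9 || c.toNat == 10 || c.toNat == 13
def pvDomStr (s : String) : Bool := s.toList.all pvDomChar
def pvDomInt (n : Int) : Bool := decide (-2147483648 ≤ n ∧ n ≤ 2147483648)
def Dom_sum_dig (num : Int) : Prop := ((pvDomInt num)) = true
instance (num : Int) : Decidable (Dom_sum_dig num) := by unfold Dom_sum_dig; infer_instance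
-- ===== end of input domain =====

-- B separates digit extraction from summation: digits are paired with their shifted exponents via zip instead of threading a rolling 'pow' through one loop.

-- ===== PORT A =====
-- A's while-loop: state (sum, pow); each step adds digit ** pow and sets pow to the digit.
def sumDigGo (num s p : Int) : Int :=
  if num > 0 then
    sumDigGo (PySem.Int.floordiv num 10)
      (s + (PySem.Int.mod num 10) ^ p.toNat)  -- digit ** pow: p ≥ 0 here, so Int '^ toNat' is exact
      (PySem.Int.mod num 10)
  else s
termination_by num.toNat
decreasing_by
  rw [PySem.Int.floordiv_eq_ediv_of_pos (by norm_num : (0:Int) < 10)]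
  omega

def sum_dig (num : Int) : Int := sumDigGo num 0 0

-- ===== PORT B =====
-- the same repeated %10 // 10 extraction, least-significant digit first
def pyDigits (num : Int) : List Int :=
  if num > 0 then PySem.Int.mod num 10 :: pyDigits (PySem.Int.floordiv num 10) else []
termination_by num.toNat
decreasing_by
  rw [PySem.Int.floordiv_eq_ediv_of_pos (by norm_num : (0:Int) < 10)]
  omega

def sum_dig_alt (num : Int) : Int :=
  let digits := pyDigits num
  let powers := 0 :: digits.dropLast       -- [0] + digits[:-1]
  ((digits.zip powers).map (fun dp => dp.1 ^ dp.2.toNat)).sum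

-- ===== PRECONDITION & SPEC =====
def Spec_sum_dig (num : Int) (out : Int) : Prop := out = sum_dig_alt num
instance (num : Int) (out : Int) : Decidable (Spec_sum_dig num out) := by unfold Spec_sum_dig; infer_instance

-- ===== CLAIM (what is proved, stated in full; the proofs are below) =====
def Claim_equal_sum_dig : Prop := ∀ (num : Int), Dom_sum_dig num → Spec_sum_dig num (sum_dig num)

-- ===== LEMMAS AND PROOFS =====

-- peeling one digit off the zip of digits with their shifted exponents
theorem zip_shift_step (f : Int × Int → Int) (d p : Int) (ds : List Int) :
    (((d :: ds).zip (p :: (d :: ds).dropLast)).map f)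
      = f (d, p) :: ((ds.zip (d :: ds.dropLast)).map f) := by
  cases ds <;> simp [List.dropLast]

-- loop invariant: the rolling-pow loop computes the zip-with-shifted-exponents sum
theorem sumDigGo_eq (num s p : Int) :
    sumDigGo num s p
      = s + (((pyDigits num).zip (p :: (pyDigits num).dropLast)).map
              (fun dp => dp.1 ^ dp.2.toNat)).sum := by
  fun_induction sumDigGo num s p with
  | case1 num s p h ih =>
      rw [pyDigits, if_pos h, zip_shift_step, List.sum_cons, ih]
      ring
  | case2 num s p h =>
      rw [pyDigits, if_neg h]
      simp

-- ===== VERDICT (by name: the statement is the Claim_ definition above) =====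
theorem sum_dig_spec : Claim_equal_sum_dig := by
  intro num _
  unfold Spec_sum_dig sum_dig sum_dig_alt
  rw [sumDigGo_eq]
  simp
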